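-- pv_equiv track=rewrite | github.com/antonio-donato/Lotto | main.py | most_likely_ambo
-- ===== SOURCE A (Python) =====
-- def most_likely_ambo(history):
--   total_numbers = 90
--   number_counts = [0] * total_numbers
--
--   # Contare quante volte ogni numero è uscito nello storico per ogni Ruota
--   for draw in history:
--     for number in draw:
--         if 1 <= number <= total_numbers:
--             number_counts[number - 1] += 1
--   # Trovare i due numeri meno presenti
--   least_likely_numbers = sorted(range(total_numbers), key=lambda x: number_counts[x])[:2]
--   return least_likely_numbers
-- ===== SOURCE B (Python) =====
-- def most_likely_ambo(history):
--     total_numbers = 90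
--     number_counts = [0] * total_numbers
--     for draw in history:
--         for number in draw:
--             if 1 <= number <= total_numbers:
--                 number_counts[number - 1] += 1
--     # single linear scan keeping the two smallest counts (strict <, so the
--     # earliest index wins ties, exactly like sorted's stability)
--     if number_counts[1] < number_counts[0]:
--         m1, m2 = 1, 0
--     else:
--         m1, m2 = 0, 1
--     c1, c2 = number_counts[m1], number_counts[m2]
--     for i in range(2, total_numbers):
--         c = number_counts[i]
--         if c < c1:
--             m1, m2, c1, c2 = i, m1, c, c1
--         elif c < c2:
--             m2, c2 = i, c
--     return [m1, m2]
-- ===== Notes on version B (the rewrite author's own statement) =====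
-- stated objective: simpler
-- what changed: The final sorted(range(90), key=...)[:2] is replaced by one linear scan that maintains the indices and counts of the two smallest entries, with strict '<' reproducing the stable tie-break (smaller index wins).
import Mathlib
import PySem

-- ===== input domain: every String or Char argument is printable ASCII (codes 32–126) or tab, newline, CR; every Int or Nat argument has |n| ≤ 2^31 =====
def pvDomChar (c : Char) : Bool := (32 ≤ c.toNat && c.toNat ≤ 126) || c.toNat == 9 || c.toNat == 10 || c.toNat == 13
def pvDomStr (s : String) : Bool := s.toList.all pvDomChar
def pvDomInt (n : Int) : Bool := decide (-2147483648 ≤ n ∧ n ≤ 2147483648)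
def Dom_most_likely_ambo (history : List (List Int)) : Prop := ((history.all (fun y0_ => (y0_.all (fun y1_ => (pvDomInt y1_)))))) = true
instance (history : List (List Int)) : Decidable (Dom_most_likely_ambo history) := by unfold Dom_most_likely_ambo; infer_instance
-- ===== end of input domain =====

-- B replaces A's sorted(range(90), key=counts)[:2] by one linear scan keeping the
-- indices/counts of the two smallest entries (strict '<' reproduces the stable tie-break).


-- ===== PORT A =====
-- counting pass: number_counts[number-1] += 1 (index is in range under the guard,
-- so pySetD/pyGetD are exact); sorted(range(90), key=...)[:2] via PySem.List.sorted/slice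
def most_likely_ambo (history : List (List Int)) : List Int :=
  let number_counts : List Int := List.replicate 90 0
  let number_counts := history.foldl (fun nc draw =>
    draw.foldl (fun nc number =>
      if 1 ≤ number ∧ number ≤ 90 then
        PySem.List.pySetD nc (number - 1) (PySem.List.pyGetD nc (number - 1) 0 + 1)
      else nc) nc) number_counts
  PySem.List.slice
    (PySem.List.sorted (PySem.List.pyRange 0 90 1)
      (fun x => PySem.List.pyGetD number_counts x 0))
    none (some 2)

-- ===== PORT B =====
-- one step of B's scan: state (m1, m2, c1, c2), strict '<' so earlier indices win ties
def pvStep (key : Int → Int) (s : Int × Int × Int × Int) (i : Int) : Int × Int × Int × Int :=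
  let c := key i
  if c < s.2.2.1 then (i, s.1, c, s.2.2.1)
  else if c < s.2.2.2 then (s.1, i, s.2.2.1, c)
  else s

def most_likely_ambo_alt (history : List (List Int)) : List Int :=
  let number_counts : List Int := List.replicate 90 0
  let number_counts := history.foldl (fun nc draw =>
    draw.foldl (fun nc number =>
      if 1 ≤ number ∧ number ≤ 90 then
        PySem.List.pySetD nc (number - 1) (PySem.List.pyGetD nc (number - 1) 0 + 1)
      else nc) nc) number_counts
  -- m1,m2 = (1,0) if counts[1] < counts[0] else (0,1); c1,c2 = counts[m1],counts[m2]
  let init : Int × Int × Int × Int :=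
    if PySem.List.pyGetD number_counts 1 0 < PySem.List.pyGetD number_counts 0 0 then
      (1, 0, PySem.List.pyGetD number_counts 1 0, PySem.List.pyGetD number_counts 0 0)
    else
      (0, 1, PySem.List.pyGetD number_counts 0 0, PySem.List.pyGetD number_counts 1 0)
  let r := (PySem.List.pyRange 2 90 1).foldl
    (pvStep (fun x => PySem.List.pyGetD number_counts x 0)) init
  [r.1, r.2.1]

-- ===== PRECONDITION & SPEC =====
def Spec_most_likely_ambo (history : List (List Int)) (out : List Int) : Prop := out = most_likely_ambo_alt history
instance (history : List (List Int)) (out : List Int) : Decidable (Spec_most_likely_ambo history out) := by unfold Spec_most_likely_ambo; infer_instance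

-- ===== CLAIM (what is proved, stated in full; the proofs are below) =====
def Claim_equal_most_likely_ambo : Prop := ∀ (history : List (List Int)), Dom_most_likely_ambo history → Spec_most_likely_ambo history (most_likely_ambo history)

-- ===== LEMMAS AND PROOFS =====

-- unfolding insertBy on a list with at least two elements
lemma insert2 (key : Int → Int) (x a b : Int) (rest : List Int) :
    PySem.List.insertBy (fun u v => decide (key u < key v)) x (a :: b :: rest) =
      if key x < key a then x :: a :: b :: rest
      else if key x < key b then a :: x :: b :: rest
      else a :: b :: PySem.List.insertBy (fun u v => decide (key u < key v)) x rest := by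
  simp only [PySem.List.insertBy]
  split_ifs <;> simp_all

-- invariant: the first two elements of the insertion-sort accumulator are exactly B's state
lemma pvStep_eq (key : Int → Int) (m1 m2 c1 c2 i : Int) :
    pvStep key (m1, m2, c1, c2) i =
      if key i < c1 then (i, m1, key i, c1)
      else if key i < c2 then (m1, i, c1, key i)
      else (m1, m2, c1, c2) := rfl

lemma inv (key : Int → Int) : ∀ (xs : List Int) (a b : Int) (rest : List Int),
    (xs.foldl (fun acc x => PySem.List.insertBy (fun u v => decide (key u < key v)) x acc)
      (a :: b :: rest)).take 2
    = (let r := xs.foldl (pvStep key) (a, b, key a, key b); [r.1, r.2.1]) := by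
  intro xs
  induction xs with
  | nil => intro a b rest; simp
  | cons x xs ih =>
    intro a b rest
    simp only [List.foldl_cons, insert2, pvStep_eq]
    split_ifs with h1 h2
    · exact ih x a (b :: rest)
    · exact ih a x (b :: rest)
    · exact ih a b (PySem.List.insertBy (fun u v => decide (key u < key v)) x rest)

-- the heart of the equivalence, for an arbitrary key function
lemma take2_sorted_eq_scan (key : Int → Int) :
    PySem.List.slice (PySem.List.sorted (PySem.List.pyRange 0 90 1) key) none (some 2)
    = (let init : Int × Int × Int × Int :=
          if key 1 < key 0 then (1, 0, key 1, key 0) else (0, 1, key 0, key 1)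
       let r := (PySem.List.pyRange 2 90 1).foldl (pvStep key) init
       [r.1, r.2.1]) := by
  rw [PySem.List.slice_to _ (by norm_num)]
  rw [PySem.List.sorted_eq_foldl_insertBy]
  rw [PySem.List.pyRange_one_cons (by norm_num : (0:Int) < 90)]
  rw [show (0:Int) + 1 = 1 by norm_num]
  rw [PySem.List.pyRange_one_cons (by norm_num : (1:Int) < 90)]
  rw [show (1:Int) + 1 = 2 by norm_num]
  simp only [List.foldl_cons]
  by_cases h : key 1 < key 0
  · have e1 : PySem.List.insertBy (fun u v => decide (key u < key v)) 1
        (PySem.List.insertBy (fun u v => decide (key u < key v)) 0 []) = [1, 0] := by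
      simp only [PySem.List.insertBy, h]
      simp
    rw [e1, if_pos h]
    exact inv key _ 1 0 []
  · have e1 : PySem.List.insertBy (fun u v => decide (key u < key v)) 1
        (PySem.List.insertBy (fun u v => decide (key u < key v)) 0 []) = [0, 1] := by
      simp only [PySem.List.insertBy]
      simp [h]
    rw [e1, if_neg h]
    exact inv key _ 0 1 []

-- ===== VERDICT (by name: the statement is the Claim_ definition above) =====
theorem most_likely_ambo_spec : Claim_equal_most_likely_ambo := by
  intro history _
  unfold Spec_most_likely_ambo most_likely_ambo most_likely_ambo_alt
  exact take2_sorted_eq_scan _
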